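-- pv_equiv track=rewrite | github.com/Adityadubey96/MIT_6.00.1x_Jun20_PracticeProblems | P3_CloasestPower.py | closest_power
-- ===== SOURCE A (Python) =====
-- def closest_power(base, num):
--     '''
--     base: base of the exponential, integer > 1
--     num: number you want to be closest to, integer > 0
--     Find the integer exponent such that base**exponent is closest to num.
--     Note that the base**exponent may be either greater or smaller than num.
--     In case of a tie, return the smaller value.
--     Returns the exponent.
--     '''
--     x = 1
--     for i in range(0,int(num)):
--         if abs(int(base)**i - int(num)) < abs(int(base)**x - int(num)):
--             x = i
--         elif abs(int(base)**i - int(num)) == abs(int(base)**x - int(num)) and i < x: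
--             x = i
--     return x
-- ===== SOURCE B (Python) =====
-- def closest_power(base, num):
--     # One scan with an incremental running power and running best distance, plus an
--     # early exit once every remaining power is provably farther than the best so far
--     # (for abs(base) >= 2 that happens after O(log num) iterations).
--     best = 1
--     bestd = abs(base - num)
--     i = 0
--     p = 1
--     while i < num:
--         if abs(base) >= 2 and abs(p) >= 2 * num:
--             break  # all remaining powers are farther from num than the best seen
--         d = abs(p - num)
--         if d < bestd or (d == bestd and i < best):
--             best = i
--             bestd = d
--         i += 1
--         p *= base
--     return best
-- ===== Notes on version B (the rewrite author's own statement) =====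
-- stated objective: faster
-- what changed: A recomputes base**i from scratch in every one of its num iterations; B does a single pass keeping an incremental running power and running best distance, and exits early once every remaining power is provably farther than the best seen, which for abs(base) >= 2 happens after O(log num) iterations.
import Mathlib
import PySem

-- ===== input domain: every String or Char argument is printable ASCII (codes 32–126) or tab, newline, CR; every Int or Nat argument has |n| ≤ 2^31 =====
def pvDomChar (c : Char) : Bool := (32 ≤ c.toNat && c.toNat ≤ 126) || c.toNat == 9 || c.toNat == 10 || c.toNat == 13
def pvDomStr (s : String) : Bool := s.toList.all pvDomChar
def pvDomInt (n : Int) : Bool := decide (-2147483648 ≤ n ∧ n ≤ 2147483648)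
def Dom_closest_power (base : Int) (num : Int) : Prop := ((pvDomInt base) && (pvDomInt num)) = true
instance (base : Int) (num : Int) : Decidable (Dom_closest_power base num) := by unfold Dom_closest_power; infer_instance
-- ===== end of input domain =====

-- B replaces A's full scan (recomputing base**i each iteration) by a single pass with an
-- incremental running power, a running best distance, and an early exit once all remaining
-- powers are provably farther than the best seen; proved equal to A on all inputs.


-- ===== PORT A =====
def closest_power (base : Int) (num : Int) : Int :=
  (PySem.List.pyRange 0 num 1).foldl
    (fun x i =>
      if |base ^ i.toNat - num| < |base ^ x.toNat - num| then i
      else if |base ^ i.toNat - num| = |base ^ x.toNat - num| ∧ i < x then i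
      else x) 1

-- ===== PORT B =====
-- the while loop of Source B; the fuel only totalises it: the loop's own guard is i < num and
-- i advances by 1 from 0, so num.toNat steps of fuel never run out before the guard fails
def closestPowerScan (base : Int) (num : Int) : Nat → Int → Int → Int → Int → Int
  | 0, _i, _p, best, _bestd => best
  | fuel + 1, i, p, best, bestd =>
      if i < num then
        if 2 ≤ |base| ∧ 2 * num ≤ |p| then best
        else
          if |p - num| < bestd ∨ (|p - num| = bestd ∧ i < best) then
            closestPowerScan base num fuel (i + 1) (p * base) i (|p - num|)
          else
            closestPowerScan base num fuel (i + 1) (p * base) best bestd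
      else best

def closest_power_alt (base : Int) (num : Int) : Int :=
  closestPowerScan base num num.toNat 0 1 1 (|base - num|)

-- ===== PRECONDITION & SPEC =====
def Spec_closest_power (base : Int) (num : Int) (out : Int) : Prop := out = closest_power_alt base num
instance (base : Int) (num : Int) (out : Int) : Decidable (Spec_closest_power base num out) := by
  unfold Spec_closest_power; infer_instance

-- ===== CLAIM (what is proved, stated in full; the proofs are below) =====
def Claim_equal_closest_power : Prop := ∀ (base : Int) (num : Int), Dom_closest_power base num → Spec_closest_power base num (closest_power base num)

-- ===== LEMMAS AND PROOFS =====

-- lexicographic "at least as close, ties broken by smaller exponent"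
def pvLexLe (f : Int → Int) (a v : Int) : Prop := f a < f v ∨ (f a = f v ∧ a ≤ v)

theorem pvLexLe_refl (f : Int → Int) (a : Int) : pvLexLe f a a := by
  unfold pvLexLe; omega

theorem pvLexLe_trans (f : Int → Int) {a c d : Int}
    (h1 : pvLexLe f a c) (h2 : pvLexLe f c d) : pvLexLe f a d := by
  unfold pvLexLe at *; omega

-- A's fold computes the pvLexLe-least element of init :: l
theorem pv_fold_min (f : Int → Int) (l : List Int) (init : Int) :
    (l.foldl (fun x i =>
        if f i < f x then i
        else if f i = f x ∧ i < x then i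
        else x) init) ∈ init :: l ∧
    ∀ v ∈ init :: l, pvLexLe f
      (l.foldl (fun x i =>
        if f i < f x then i
        else if f i = f x ∧ i < x then i
        else x) init) v := by
  induction l generalizing init with
  | nil =>
    constructor
    · simp
    · intro v hv; simp at hv; subst hv; exact pvLexLe_refl f _
  | cons hd tl ih =>
    simp only [List.foldl_cons]
    set init' := if f hd < f init then hd else if f hd = f init ∧ hd < init then hd else init with hinit'
    obtain ⟨hmem, hmin⟩ := ih init'
    have hinit'_mem : init' = hd ∨ init' = init := by
      rw [hinit']; split_ifs <;> simp
    have hle_init : pvLexLe f init' init := by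
      rw [hinit']; unfold pvLexLe; split_ifs <;> omega
    have hle_hd : pvLexLe f init' hd := by
      rw [hinit']; unfold pvLexLe; split_ifs <;> omega
    constructor
    · rcases List.mem_cons.mp hmem with h | h
      · rcases hinit'_mem with h' | h' <;> simp [h ▸ h']
      · simp [h]
    · intro v hv
      rcases List.mem_cons.mp hv with h | h
      · subst h; exact pvLexLe_trans f (hmin init' (by simp)) hle_init
      · rcases List.mem_cons.mp h with h' | h'
        · subst h'; exact pvLexLe_trans f (hmin init' (by simp)) hle_hd
        · exact hmin v (by simp [h'])

-- folding candidates that are all strictly farther changes nothing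
theorem pv_fold_no_improve (f : Int → Int) (l : List Int) (b : Int)
    (h : ∀ v ∈ l, f b < f v) :
    l.foldl (fun x i =>
        if f i < f x then i
        else if f i = f x ∧ i < x then i
        else x) b = b := by
  induction l with
  | nil => rfl
  | cons hd tl ih =>
    have hhd := h hd (by simp)
    simp only [List.foldl_cons]
    rw [if_neg (by omega), if_neg (by omega)]
    exact ih (fun v hv => h v (by simp [hv]))

-- B's loop maintains: p = base^i, best = A's fold over the prefix [0, i), bestd = its distance;
-- on the early exit all remaining candidates are strictly farther, so the prefix fold is final
theorem pv_scan_spec (base num : Int) :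
    ∀ (fuel : Nat) (i p best bestd : Int),
      0 ≤ i → i ≤ num → (fuel : Int) = num - i →
      p = base ^ i.toNat →
      best = (PySem.List.pyRange 0 i 1).foldl
        (fun x j =>
          if |base ^ j.toNat - num| < |base ^ x.toNat - num| then j
          else if |base ^ j.toNat - num| = |base ^ x.toNat - num| ∧ j < x then j
          else x) 1 →
      bestd = |base ^ best.toNat - num| →
      closestPowerScan base num fuel i p best bestd =
        (PySem.List.pyRange 0 num 1).foldl
          (fun x j =>
            if |base ^ j.toNat - num| < |base ^ x.toNat - num| then j
            else if |base ^ j.toNat - num| = |base ^ x.toNat - num| ∧ j < x then j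
            else x) 1 := by
  intro fuel
  induction fuel with
  | zero =>
    intro i p best bestd h0 hle hf hp hbest hbd
    have : i = num := by omega
    subst this
    simpa [closestPowerScan] using hbest
  | succ fuel ih =>
    intro i p best bestd h0 hle hf hp hbest hbd
    have hi_lt : i < num := by push_cast at hf; omega
    simp only [closestPowerScan]
    rw [if_pos hi_lt]
    by_cases hs : 2 ≤ |base| ∧ 2 * num ≤ |p|
    · rw [if_pos hs]
      have hnum1 : (1 : Int) ≤ num := by omega
      have hi1 : (1 : Int) ≤ i := by
        by_contra h
        have hi0 : i = 0 := by omega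
        rw [hi0] at hp
        simp only [Int.toNat_zero, pow_zero] at hp
        rw [hp] at hs
        simp only [abs_one] at hs
        omega
      rw [PySem.List.pyRange_one_append 0 i num (by omega) (by omega),
        List.foldl_append, ← hbest]
      symm
      apply pv_fold_no_improve
      intro v hv
      rw [PySem.List.mem_pyRange_one] at hv
      have hmin := (pv_fold_min (fun w => |base ^ w.toNat - num|)
        (PySem.List.pyRange 0 i 1) 1).2 0
        (List.mem_cons_of_mem _ (PySem.List.mem_pyRange_one.mpr (by omega)))
      rw [← hbest] at hmin
      unfold pvLexLe at hmin
      simp only at hmin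
      have hf0 : |base ^ ((0 : Int)).toNat - num| = num - 1 := by
        simp only [Int.toNat_zero, pow_zero]
        rw [abs_of_nonpos (by omega)]
        ring
      rw [hf0] at hmin
      have h1b : (1 : Int) ≤ |base| := by omega
      have hmono : |base| ^ i.toNat ≤ |base| ^ v.toNat :=
        pow_le_pow_right₀ h1b (by omega)
      have habs1 : |base ^ i.toNat| = |base| ^ i.toNat := abs_pow base i.toNat
      have habs2 : |base ^ v.toNat| = |base| ^ v.toNat := abs_pow base v.toNat
      have htri : |base ^ v.toNat| - |num| ≤ |base ^ v.toNat - num| :=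
        abs_sub_abs_le_abs_sub _ _
      have hnumabs : |num| = num := abs_of_nonneg (by omega)
      have hp2 : 2 * num ≤ |base ^ i.toNat| := by rw [← hp]; exact hs.2
      omega
    · rw [if_neg hs]
      have hpi : |p - num| = |base ^ i.toNat - num| := by rw [hp]
      have hsucc : (PySem.List.pyRange 0 (i + 1) 1).foldl
          (fun x j =>
            if |base ^ j.toNat - num| < |base ^ x.toNat - num| then j
            else if |base ^ j.toNat - num| = |base ^ x.toNat - num| ∧ j < x then j
            else x) 1 =
          (if |base ^ i.toNat - num| < |base ^ best.toNat - num| then i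
           else if |base ^ i.toNat - num| = |base ^ best.toNat - num| ∧ i < best then i
           else best) := by
        rw [PySem.List.pyRange_one_succ_right (by omega : (0:Int) ≤ i),
          List.foldl_append, ← hbest]
        rfl
      have hpow : p * base = base ^ (i + 1).toNat := by
        have ht : (i + 1).toNat = i.toNat + 1 := by omega
        rw [ht, pow_succ, ← hp]
      by_cases hc : |p - num| < bestd ∨ (|p - num| = bestd ∧ i < best)
      · rw [if_pos hc]
        rw [hpi, hbd] at hc
        apply ih (i + 1) (p * base) i (|p - num|) (by omega) (by omega)
          (by push_cast at hf ⊢; omega) hpow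
        · rw [hsucc]
          split_ifs <;> omega
        · exact hpi
      · rw [if_neg hc]
        rw [hpi, hbd] at hc
        apply ih (i + 1) (p * base) best bestd (by omega) (by omega)
          (by push_cast at hf ⊢; omega) hpow
        · rw [hsucc]
          split_ifs <;> omega
        · exact hbd

-- ===== VERDICT (by name: the statement is the Claim_ definition above) =====
theorem closest_power_spec : Claim_equal_closest_power := by
  intro base num _hdom
  unfold Spec_closest_power
  by_cases hn : 0 ≤ num
  · have hB : closest_power_alt base num =
        closestPowerScan base num num.toNat 0 1 1 (|base - num|) := rfl
    rw [hB]
    rw [pv_scan_spec base num num.toNat 0 1 1 (|base - num|) (by omega) (by omega)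
      (by omega) (by simp) (by rw [PySem.List.pyRange_one_eq_nil (by omega)]; rfl)
      (by norm_num)]
    rfl
  · have hA : closest_power base num = 1 := by
      unfold closest_power
      rw [PySem.List.pyRange_one_eq_nil (by omega)]
      rfl
    have hB : closest_power_alt base num = 1 := by
      unfold closest_power_alt
      have hnt : num.toNat = 0 := by omega
      rw [hnt]
      rfl
    rw [hA, hB]
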